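-- pv_equiv track=rewrite | github.com/wellcometrust/wellcome_vision_assistant | app/food.py | text_to_menu_items
-- ===== SOURCE A (Python) =====
-- def is_date(text):
--     tokens = text.split() + [None]
--     return tokens[0] in ['Monday', 'Tuesday', 'Wednesday', 'Thursday', 'Friday', 'Saturday', 'Sunday']
--
-- def text_to_menu_items(text):
--     text_lines = text.split('\n')
--
--     menu_items_indices = []
--     for index, line in enumerate(text_lines):
--         if is_date(line):
--             menu_items_indices.append(index)
--
--     menu_items = []
--     for index in range(len(menu_items_indices)-1):
--         start_index, end_index = menu_items_indices[index:index+2]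
--         date_component = text_lines[start_index]
--         food_component = " ".join(text_lines[start_index+1:end_index])
--         menu_items.append((date_component, food_component))
--     return menu_items
-- ===== SOURCE B (Python) =====
-- def is_date(text):
--     tokens = text.split() + [None]
--     return tokens[0] in ['Monday', 'Tuesday', 'Wednesday', 'Thursday', 'Friday', 'Saturday', 'Sunday']
--
-- def text_to_menu_items(text):
--     menu_items = []
--     current_date = None
--     buffer = []
--     for line in text.split('\n'):
--         if is_date(line):
--             if current_date is not None:
--                 menu_items.append((current_date, ' '.join(buffer)))
--             current_date = line
--             buffer = []
--         elif current_date is not None: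
--             buffer.append(line)
--     # no final flush: the last date's group is intentionally not emitted, matching A
--     return menu_items
-- ===== Notes on version B (the rewrite author's own statement) =====
-- stated objective: simpler
-- what changed: Replaces A's two-pass scheme (collect all date-line indices, then re-slice the line list between consecutive indices) with one linear pass keeping a current date and a food-line buffer, emitting a pair when the next date line is reached (no final flush, matching A's dropping of the last date's group).
import Mathlib
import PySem

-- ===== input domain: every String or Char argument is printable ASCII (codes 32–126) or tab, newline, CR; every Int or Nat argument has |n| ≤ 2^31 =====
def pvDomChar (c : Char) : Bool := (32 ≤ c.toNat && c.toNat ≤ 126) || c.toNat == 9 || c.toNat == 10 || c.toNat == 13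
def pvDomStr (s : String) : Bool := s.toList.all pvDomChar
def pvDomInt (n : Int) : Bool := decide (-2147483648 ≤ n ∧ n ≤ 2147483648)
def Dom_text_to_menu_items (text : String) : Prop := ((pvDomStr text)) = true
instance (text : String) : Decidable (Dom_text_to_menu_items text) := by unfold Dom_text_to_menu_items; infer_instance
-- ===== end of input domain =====

-- B replaces A's two-pass index-collect-then-slice scheme with one linear accumulator pass ('simpler').

-- ===== PORT A =====
-- helper is_date, shared by both Pythons
def pyIsDate (text : String) : Bool :=
  let tokens : List (Option String) := (PySem.Str.split₀ text).map some ++ [none]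
  [some "Monday", some "Tuesday", some "Wednesday", some "Thursday",
   some "Friday", some "Saturday", some "Sunday"].contains (PySem.List.pyGetD tokens 0 none)

def text_to_menu_items (text : String) : List (String × String) :=
  -- text.split('\n'): split? is exact for a nonempty separator; the [] default is never taken
  let text_lines := (PySem.Str.split? text "\n").getD []
  let menu_items_indices : List Int :=
    (PySem.List.enumerate text_lines).foldl
      (fun acc p => if pyIsDate p.2 then acc ++ [p.1] else acc) []
  let menu_items :=
    (PySem.List.pyRange 0 ((menu_items_indices.length : Int) - 1) 1).foldl
      (fun acc index =>
        match PySem.List.slice menu_items_indices (some index) (some (index + 2)) with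
        | [start_index, end_index] =>
          let date_component := PySem.List.pyGetD text_lines start_index ""
          let food_component :=
            PySem.Str.join " " (PySem.List.slice text_lines (some (start_index + 1)) (some end_index))
          acc ++ [(date_component, food_component)]
        | _ => acc  -- unreachable: the slice always has exactly 2 elements for index < len-1
        ) []
  menu_items

-- ===== PORT B =====
-- loop body of B's single pass: state = (menu_items, current_date, buffer)
def bStep (st : List (String × String) × Option String × List String) (line : String) :
    List (String × String) × Option String × List String :=
  if pyIsDate line then
    match st.2.1 with
    | some d => (st.1 ++ [(d, PySem.Str.join " " st.2.2)], some line, [])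
    | none => (st.1, some line, [])
  else
    match st.2.1 with
    | some _ => (st.1, st.2.1, st.2.2 ++ [line])
    | none => st

def text_to_menu_items_alt (text : String) : List (String × String) :=
  (((PySem.Str.split? text "\n").getD []).foldl bStep ([], none, [])).1

-- ===== PRECONDITION & SPEC =====
def Spec_text_to_menu_items (text : String) (out : List (String × String)) : Prop := out = text_to_menu_items_alt text
instance (text : String) (out : List (String × String)) : Decidable (Spec_text_to_menu_items text out) := by unfold Spec_text_to_menu_items; infer_instance

-- ===== CLAIM (what is proved, stated in full; the proofs are below) =====
def Claim_equal_text_to_menu_items : Prop := ∀ (text : String), Dom_text_to_menu_items text → Spec_text_to_menu_items text (text_to_menu_items text)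

-- ===== LEMMAS AND PROOFS =====

-- reference function: the common value of both ports on a given line list
def refMenu : List String → List (String × String)
  | [] => []
  | l :: ls =>
    if pyIsDate l then
      match ls.findIdx? (fun x => pyIsDate x) with
      | none => []
      | some j => (l, PySem.Str.join " " (ls.take j)) :: refMenu ls
    else refMenu ls

-- Nat-valued date-line indices of a line list
def natDix : List String → List Nat
  | [] => []
  | l :: ls => if pyIsDate l then 0 :: (natDix ls).map (· + 1) else (natDix ls).map (· + 1)

-- the pairs A builds, in clean Nat form
def pairsNat (xs : List Nat) (lines : List String) : List (String × String) :=
  (xs.zip xs.tail).map (fun p =>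
    (lines.getD p.1 "", PySem.Str.join " " ((lines.drop (p.1 + 1)).take (p.2 - (p.1 + 1)))))

-- B's tail loop once a date is pending
def bTail (d : String) (buf : List String) : List String → List (String × String)
  | [] => []
  | l :: ls =>
    if pyIsDate l then (d, PySem.Str.join " " buf) :: bTail l [] ls
    else bTail d (buf ++ [l]) ls

-- A's loop body over the Int index list, as a named function
def aBody (idxs : List Int) (lines : List String)
    (acc : List (String × String)) (index : Int) : List (String × String) :=
  match PySem.List.slice idxs (some index) (some (index + 2)) with
  | [start_index, end_index] =>
    acc ++ [(PySem.List.pyGetD lines start_index "",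
             PySem.Str.join " " (PySem.List.slice lines (some (start_index + 1)) (some end_index)))]
  | _ => acc

def aOn (text_lines : List String) : List (String × String) :=
  let menu_items_indices : List Int :=
    (PySem.List.enumerate text_lines).foldl
      (fun acc p => if pyIsDate p.2 then acc ++ [p.1] else acc) []
  (PySem.List.pyRange 0 ((menu_items_indices.length : Int) - 1) 1).foldl
    (aBody menu_items_indices text_lines) []

lemma a_eq_aOn (text : String) :
    text_to_menu_items text = aOn ((PySem.Str.split? text "\n").getD []) := rfl

lemma dix_shift (ls : List String) : ∀ (s : Int),
    ((PySem.List.enumerate ls s).filter (fun p => pyIsDate p.2)).map (·.1)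
      = (natDix ls).map (fun (k : Nat) => s + (k : Int)) := by
  induction ls with
  | nil => intro s; simp [natDix]
  | cons l t ih =>
    intro s
    rw [PySem.List.enumerate_cons]
    by_cases h : pyIsDate l
    · rw [natDix]
      simp only [h, if_true, List.filter_cons, List.map_cons, List.map_map]
      rw [ih (s + 1)]
      congr 1
      · simp
      · apply List.map_congr_left; intro k _; simp [Function.comp]; ring
    · rw [natDix]
      simp only [h, Bool.false_eq_true, if_false, List.filter_cons, List.map_map]
      rw [ih (s + 1)]
      apply List.map_congr_left; intro k _; simp [Function.comp]; ring

lemma slice_castmap_shift (x : Int) (ys : List Int) (k : Nat) :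
    PySem.List.slice (x :: ys) (some ((k : Int) + 1)) (some ((k : Int) + 1 + 2))
      = PySem.List.slice ys (some ((k : Int))) (some ((k : Int) + 2)) := by
  have h2 : ((k : Int) + 1 + 2) = ((k + 1 : Nat) : Int) + ((2 : Nat) : Int) := by push_cast; ring
  have h1 : ((k : Int) + 1) = ((k + 1 : Nat) : Int) := by push_cast; ring
  have h3 : ((k : Int) + 2) = ((k : Int)) + ((2 : Nat) : Int) := by push_cast; ring
  rw [h2, h1, h3, PySem.List.slice_natCast_add, PySem.List.slice_natCast_add]
  simp

lemma aFold_eq_pairsNat : ∀ (n : Nat) (xs : List Nat) (lines : List String)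
    (acc : List (String × String)), xs.length = n + 1 →
    (List.range n).foldl
        (fun acc (k : Nat) => aBody (xs.map (fun (k : Nat) => (k : Int))) lines acc (k : Int)) acc
      = acc ++ pairsNat xs lines := by
  intro n
  induction n with
  | zero =>
    intro xs lines acc h
    match xs, h with
    | [x], _ => simp [pairsNat]
  | succ n ih =>
    intro xs lines acc h
    match xs with
    | x :: y :: t =>
      have hlen : (y :: t).length = n + 1 := by simpa using h
      rw [List.range_succ_eq_map, List.foldl_cons, List.foldl_map]
      have hhead : aBody ((x :: y :: t).map (fun (k : Nat) => (k : Int))) lines acc ((0 : Nat) : Int)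
          = acc ++ [(lines.getD x "", PySem.Str.join " " ((lines.drop (x + 1)).take (y - (x + 1))))] := by
        unfold aBody
        have h0 : ((0 : Nat) : Int) + 2 = ((0 : Nat) : Int) + ((2 : Nat) : Int) := by norm_num
        rw [h0, PySem.List.slice_natCast_add]
        simp
        have hx1 : ((x : Int)) + 1 = ((x + 1 : Nat) : Int) := by push_cast; ring
        rw [hx1, PySem.List.slice_natCast]
      have hrest : ∀ (acc' : List (String × String)),
          (List.range n).foldl
            (fun acc (k : Nat) => aBody ((x :: y :: t).map (fun (k : Nat) => (k : Int))) lines acc ((Nat.succ k : Nat) : Int)) acc'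
          = (List.range n).foldl
            (fun acc (k : Nat) => aBody ((y :: t).map (fun (k : Nat) => (k : Int))) lines acc ((k : Nat) : Int)) acc' := by
        intro acc'
        congr 1
        funext a k
        unfold aBody
        have hk : ((Nat.succ k : Nat) : Int) = (k : Int) + 1 := by push_cast; ring
        rw [hk]
        simp only [List.map_cons]
        rw [slice_castmap_shift]
      rw [hhead, hrest, ih (y :: t) lines _ hlen]
      have hp : pairsNat (x :: y :: t) lines
          = (lines.getD x "", PySem.Str.join " " ((lines.drop (x + 1)).take (y - (x + 1)))) :: pairsNat (y :: t) lines := by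
        simp [pairsNat]
      rw [hp]
      simp

lemma aOn_eq_pairsNat (lines : List String) :
    aOn lines = pairsNat (natDix lines) lines := by
  unfold aOn
  rw [PySem.List.foldl_append_if (fun p => pyIsDate p.2) (fun p : Int × String => p.1)]
  simp only [List.nil_append]
  rw [dix_shift lines 0]
  have hcast : (natDix lines).map (fun (k : Nat) => (0 : Int) + (k : Int))
      = (natDix lines).map (fun (k : Nat) => (k : Int)) := by
    apply List.map_congr_left; intro k _; ring
  rw [hcast]
  match h : natDix lines with
  | [] => simp [PySem.List.pyRange_one_eq_nil (by norm_num : (-1 : Int) ≤ 0), pairsNat]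
  | x :: rest =>
    have hlen : ((x :: rest).map (fun (k : Nat) => (k : Int))).length = rest.length + 1 := by simp
    rw [hlen]
    rw [show (((rest.length + 1 : Nat) : Int)) - 1 = ((rest.length : Nat) : Int) by push_cast; ring]
    rw [PySem.List.pyRange_zero_natCast, List.foldl_map]
    exact aFold_eq_pairsNat rest.length (x :: rest) lines [] (by simp)

lemma shiftPairs (xs : List Nat) (l : String) (ls : List String) :
    pairsNat (xs.map (· + 1)) (l :: ls) = pairsNat xs ls := by
  unfold pairsNat
  have htail : (xs.map (· + 1)).tail = xs.tail.map (· + 1) := by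
    cases xs <;> simp
  rw [htail, List.zip_map, List.map_map]
  apply List.map_congr_left
  intro p _
  obtain ⟨i, j⟩ := p
  have hm : Prod.map (· + 1) (· + 1) (i, j) = (i + 1, j + 1) := rfl
  simp only [Function.comp_apply, hm]
  simp only [List.getD_cons_succ, List.drop_succ_cons]
  rw [show j + 1 - (i + 1 + 1) = j - (i + 1) by omega]

lemma headIdx (ls : List String) :
    (natDix ls).head? = ls.findIdx? (fun x => pyIsDate x) := by
  induction ls with
  | nil => simp [natDix]
  | cons l t ih =>
    by_cases h : pyIsDate l
    · simp [natDix, h, List.findIdx?_cons]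
    · simp only [natDix, h, Bool.false_eq_true, if_false, List.findIdx?_cons, ← ih]
      cases natDix t <;> simp

lemma pairsNat_natDix_eq_refMenu (lines : List String) :
    pairsNat (natDix lines) lines = refMenu lines := by
  induction lines with
  | nil => simp [natDix, pairsNat, refMenu]
  | cons l ls ih =>
    by_cases h : pyIsDate l
    · rw [refMenu]
      simp only [h, if_true]
      rw [natDix]; simp only [h, if_true]
      match hd : natDix ls with
      | [] =>
        have hnone : ls.findIdx? (fun x => pyIsDate x) = none := by rw [← headIdx, hd]; rfl
        simp [hnone, pairsNat]
      | j :: rest =>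
        have hidx : ls.findIdx? (fun x => pyIsDate x) = some j := by rw [← headIdx, hd]; rfl
        rw [hidx]
        have hzip : pairsNat (0 :: (j :: rest).map (· + 1)) (l :: ls)
            = (l, PySem.Str.join " " (ls.take j)) :: pairsNat ((j :: rest).map (· + 1)) (l :: ls) := by
          unfold pairsNat
          simp
        rw [hzip, shiftPairs, ← hd, ih]
    · rw [refMenu]; simp only [h, Bool.false_eq_true, if_false]
      rw [natDix]; simp only [h, Bool.false_eq_true, if_false]
      rw [shiftPairs, ih]

lemma bTail_eq (ls : List String) : ∀ (d : String) (buf : List String),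
    bTail d buf ls = match ls.findIdx? (fun x => pyIsDate x) with
      | none => []
      | some j => (d, PySem.Str.join " " (buf ++ ls.take j)) :: refMenu ls := by
  induction ls with
  | nil => intro d buf; simp [bTail]
  | cons l t ih =>
    intro d buf
    by_cases h : pyIsDate l
    · rw [bTail]; simp only [h, if_true]
      rw [List.findIdx?_cons]; simp only [h, if_true]
      rw [ih l [], refMenu]; simp only [h, if_true]
      match t.findIdx? (fun x => pyIsDate x) with
      | none => simp
      | some j => simp
    · rw [bTail]; simp only [h, Bool.false_eq_true, if_false]
      rw [List.findIdx?_cons]; simp only [h, Bool.false_eq_true, if_false]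
      rw [ih d (buf ++ [l]), refMenu]; simp only [h, Bool.false_eq_true, if_false]
      match t.findIdx? (fun x => pyIsDate x) with
      | none => simp
      | some j => simp

lemma fold_some (ls : List String) : ∀ (res : List (String × String)) (d : String) (buf : List String),
    (ls.foldl bStep (res, some d, buf)).1 = res ++ bTail d buf ls := by
  induction ls with
  | nil => intro res d buf; simp [bTail]
  | cons l t ih =>
    intro res d buf
    by_cases h : pyIsDate l
    · rw [List.foldl_cons, bStep]; simp only [h, if_true]
      rw [ih, bTail]; simp only [h, if_true]
      simp
    · rw [List.foldl_cons, bStep]; simp only [h, Bool.false_eq_true, if_false]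
      rw [ih, bTail]; simp only [h, Bool.false_eq_true, if_false]

lemma fold_none (ls : List String) : ∀ (res : List (String × String)) (buf : List String),
    (ls.foldl bStep (res, none, buf)).1 = res ++ refMenu ls := by
  induction ls with
  | nil => intro res buf; simp [refMenu]
  | cons l t ih =>
    intro res buf
    by_cases h : pyIsDate l
    · rw [List.foldl_cons, bStep]; simp only [h, if_true]
      rw [fold_some, bTail_eq, refMenu]; simp only [h, if_true]
      match t.findIdx? (fun x => pyIsDate x) with
      | none => simp
      | some j => simp
    · rw [List.foldl_cons, bStep]; simp only [h, Bool.false_eq_true, if_false]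
      rw [refMenu]; simp only [h, Bool.false_eq_true, if_false]
      exact ih res buf

-- ===== VERDICT (by name: the statement is the Claim_ definition above) =====
theorem text_to_menu_items_spec : Claim_equal_text_to_menu_items := by
  intro text _
  unfold Spec_text_to_menu_items text_to_menu_items_alt
  rw [a_eq_aOn, aOn_eq_pairsNat, pairsNat_natDix_eq_refMenu, fold_none]
  simp
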